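-- pv_equiv track=rewrite | github.com/ShaShiDiZhuanLan/Demo_Jieba_Python | python/deal_txt.py | deal_lines
-- ===== SOURCE A (Python) =====
-- def deal_lines(txt):
--     arr = []
--     total_arr = []
--     for item in txt:
--         item_arr = item.split(" ")
--         s = [x.strip() for x in item_arr] # 去除item_arr中的\n
--         arr.append(s)
--         total_arr = total_arr + s
--     return arr,total_arr
-- ===== SOURCE B (Python) =====
-- def deal_lines(txt):
--     # rows: split each line on " " and strip each token
--     arr = [[x.strip() for x in item.split(" ")] for item in txt]
--     # total_arr: join the whole text with " " and split ONCE globally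
--     # (correct because split on a single literal space distributes over the join)
--     total_arr = [x.strip() for x in " ".join(txt).split(" ")] if txt else []
--     return arr, total_arr
-- ===== Notes on version B (the rewrite author's own statement) =====
-- stated objective: faster
-- what changed: B computes total_arr by joining the whole input with " " and splitting the joined string once globally (stripping the tokens), instead of A's accumulation of per-line splits by repeated quadratic list concatenation; arr is built in an independent comprehension pass.
import Mathlib
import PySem

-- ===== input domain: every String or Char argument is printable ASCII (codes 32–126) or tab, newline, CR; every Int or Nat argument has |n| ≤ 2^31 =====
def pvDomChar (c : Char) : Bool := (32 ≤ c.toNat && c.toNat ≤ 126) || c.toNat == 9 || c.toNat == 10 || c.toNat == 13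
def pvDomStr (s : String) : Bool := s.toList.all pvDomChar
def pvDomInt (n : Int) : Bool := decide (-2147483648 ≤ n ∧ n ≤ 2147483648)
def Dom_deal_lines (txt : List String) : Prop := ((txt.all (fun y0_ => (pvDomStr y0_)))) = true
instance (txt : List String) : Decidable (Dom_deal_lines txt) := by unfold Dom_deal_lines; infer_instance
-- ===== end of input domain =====

-- B computes total_arr by joining the whole input with " " and splitting the joined
-- string once globally, instead of A's quadratic repeated list concatenation of per-line splits.


-- ===== PORT A =====
def deal_lines (txt : List String) : List (List String) × List String :=
  txt.foldl (fun st item =>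
    let item_arr := ((PySem.Str.split? item " ").getD [])
    let s := item_arr.map PySem.Str.strip
    (st.1 ++ [s], st.2 ++ s)) ([], [])

-- ===== PORT B =====
def deal_lines_alt (txt : List String) : List (List String) × List String :=
  let arr := txt.map (fun item => ((PySem.Str.split? item " ").getD []).map PySem.Str.strip)
  let total_arr := if txt = [] then []
    else ((PySem.Str.split? (PySem.Str.join " " txt) " ").getD []).map PySem.Str.strip
  (arr, total_arr)

-- ===== PRECONDITION & SPEC =====
def Spec_deal_lines (txt : List String) (out : List (List String) × List String) : Prop := out = deal_lines_alt txt
instance (txt : List String) (out : List (List String) × List String) : Decidable (Spec_deal_lines txt out) := by unfold Spec_deal_lines; infer_instance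

-- ===== CLAIM (what is proved, stated in full; the proofs are below) =====
def Claim_equal_deal_lines : Prop := ∀ (txt : List String), Dom_deal_lines txt → Spec_deal_lines txt (deal_lines txt)

-- ===== LEMMAS AND PROOFS =====

-- A's foldl accumulates the rows and their running concatenation.
theorem deal_lines_foldl_inv (txt : List String) (a : List (List String)) (t : List String) :
    txt.foldl (fun st item =>
      let item_arr := ((PySem.Str.split? item " ").getD [])
      let s := item_arr.map PySem.Str.strip
      (st.1 ++ [s], st.2 ++ s)) (a, t)
    = (a ++ txt.map (fun item => (((PySem.Str.split? item " ").getD [])).map PySem.Str.strip),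
       t ++ (txt.map (fun item => (((PySem.Str.split? item " ").getD [])).map PySem.Str.strip)).flatten) := by
  induction txt generalizing a t with
  | nil => simp
  | cons h tl ih => simp [List.foldl, ih]

-- Splitting on a single space, written as direct structural recursion (proof-side model of splitOn.go).
def split1 (pre : List Char) : List Char → List (List Char)
  | [] => [pre]
  | c :: rest => if c = ' ' then pre :: split1 [] rest else split1 (pre ++ [c]) rest

theorem go_spec : ∀ (l : List Char) (fuel : Nat) (cur : List Char) (acc : List (List Char)),
    l.length < fuel →
    PySem.Chars.splitOn.go [' '] fuel l cur acc = acc.reverse ++ split1 cur.reverse l := by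
  intro l
  induction l with
  | nil => intro fuel cur acc h
           match fuel with
           | f+1 => simp [PySem.Chars.splitOn.go, split1]
  | cons c rest ih =>
      intro fuel cur acc h
      match fuel with
      | f+1 =>
        simp only [PySem.Chars.splitOn.go]
        by_cases hc : c = ' '
        · subst hc
          have hp : [' '].isPrefixOf (' ' :: rest) = true := by simp [List.isPrefixOf]
          simp only [hp, if_pos]
          rw [show List.drop [' '].length (' ' :: rest) = rest by simp]
          rw [ih f [] (cur.reverse :: acc) (by simpa using Nat.lt_of_succ_lt_succ h)]
          simp [split1]
        · have hp : [' '].isPrefixOf (c :: rest) = false := by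
            simp [List.isPrefixOf]; exact fun h' => hc h'.symm
          simp only [hp, Bool.false_eq_true, if_false]
          rw [ih f (c :: cur) acc (by simpa using Nat.lt_of_succ_lt_succ h)]
          simp [split1, hc]

theorem splitOn_eq_split1 (s : List Char) : PySem.Chars.splitOn s [' '] = split1 [] s := by
  simpa using go_spec s (s.length + 1) [] [] (by omega)

theorem split1_append (a b : List Char) : ∀ pre, split1 pre (a ++ ' ' :: b) = split1 pre a ++ split1 [] b := by
  induction a with
  | nil => intro pre; simp [split1]
  | cons c rest ih => intro pre; by_cases hc : c = ' ' <;> simp [split1, hc, ih]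

-- Splitting on ' ' distributes over the ' '-join: one global split = concatenation of the per-item splits.
theorem splitOn_join (txt : List (List Char)) (h : txt ≠ []) :
    PySem.Chars.splitOn (PySem.Chars.join [' '] txt) [' '] = (txt.map (fun t => PySem.Chars.splitOn t [' '])).flatten := by
  rw [splitOn_eq_split1]
  induction txt with
  | nil => simp at h
  | cons x tl ih =>
    cases tl with
    | nil => simp [PySem.Chars.join, List.intercalate, splitOn_eq_split1]
    | cons y tl2 =>
      have hj : PySem.Chars.join [' '] (x :: y :: tl2) = x ++ ' ' :: PySem.Chars.join [' '] (y :: tl2) := by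
        simp [PySem.Chars.join, List.intercalate]
      rw [hj, split1_append]
      rw [ih (by simp)]
      simp [splitOn_eq_split1]

-- B's global join+split+strip equals the concatenation of A's per-line split+strip rows.
theorem total_eq (txt : List String) (h : txt ≠ []) :
    ((PySem.Str.split? (PySem.Str.join " " txt) " ").getD []).map PySem.Str.strip
    = (txt.map (fun item => ((PySem.Str.split? item " ").getD []).map PySem.Str.strip)).flatten := by
  have hs : (" " : String).toList = [' '] := rfl
  simp only [PySem.Str.split?, PySem.Chars.split?, hs, List.isEmpty_cons, Bool.false_eq_true,
    if_false, Option.map_some, Option.getD_some]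
  rw [show (PySem.Str.join " " txt).toList = PySem.Chars.join [' '] (txt.map String.toList) by
    simpa [hs] using PySem.Str.toList_join " " txt]
  rw [splitOn_join (txt.map String.toList) (by simpa using h)]
  rw [List.map_flatten, List.map_map, List.map_map]
  simp [Function.comp_def]

-- ===== VERDICT (by name: the statement is the Claim_ definition above) =====
theorem deal_lines_spec : Claim_equal_deal_lines := by
  intro txt _
  show _ = _
  rcases eq_or_ne txt [] with h | h
  · subst h; rfl
  · simp only [deal_lines_alt, if_neg h, total_eq txt h]
    simpa [deal_lines] using deal_lines_foldl_inv txt [] []
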